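-- pv_equiv track=rewrite | github.com/GTseq/gtseq_microhap | gtseq_microhap_catalog_and_call.py | _gap_profile_before_ref_bases
-- ===== SOURCE A (Python) =====
-- from typing import Dict, List, Tuple, Optional
--
-- def _gap_profile_before_ref_bases(aligned_ref: str, ref_len: int) -> List[int]:
--     """For an aligned_ref string, return gaps_before[i] = number of '-' before ref base i (0..ref_len),
--     with i==ref_len representing trailing gaps after the last ref base.
--     """
--     gaps_before = [0] * (ref_len + 1)
--     r_i = 0
--     run = 0
--     for ch in aligned_ref:
--         if ch == "-":
--             run += 1
--         else:
--             if r_i <= ref_len: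
--                 gaps_before[r_i] = run
--             run = 0
--             r_i += 1
--     gaps_before[ref_len] = run
--     return gaps_before
-- ===== SOURCE B (Python) =====
-- from typing import List
--
-- def _gap_profile_before_ref_bases(aligned_ref: str, ref_len: int) -> List[int]:
--     """Positions-list re-implementation: collect base positions once, then derive each
--     gap count as a difference of consecutive base positions."""
--     base_positions = [i for i, ch in enumerate(aligned_ref) if ch != "-"]
--     result = [0] * (ref_len + 1)
--     prev = -1
--     k = 0
--     for pos in base_positions:
--         if k <= ref_len:
--             result[k] = pos - prev - 1
--         prev = pos
--         k += 1
--     result[ref_len] = len(aligned_ref) - prev - 1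
--     return result
-- ===== Notes on version B (the rewrite author's own statement) =====
-- stated objective: alternative
-- what changed: B first materializes the list of non-gap base positions, then derives each gap count as the difference of consecutive positions (pos - prev - 1), replacing A's incremental run counter carried through the character loop.
import Mathlib
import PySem

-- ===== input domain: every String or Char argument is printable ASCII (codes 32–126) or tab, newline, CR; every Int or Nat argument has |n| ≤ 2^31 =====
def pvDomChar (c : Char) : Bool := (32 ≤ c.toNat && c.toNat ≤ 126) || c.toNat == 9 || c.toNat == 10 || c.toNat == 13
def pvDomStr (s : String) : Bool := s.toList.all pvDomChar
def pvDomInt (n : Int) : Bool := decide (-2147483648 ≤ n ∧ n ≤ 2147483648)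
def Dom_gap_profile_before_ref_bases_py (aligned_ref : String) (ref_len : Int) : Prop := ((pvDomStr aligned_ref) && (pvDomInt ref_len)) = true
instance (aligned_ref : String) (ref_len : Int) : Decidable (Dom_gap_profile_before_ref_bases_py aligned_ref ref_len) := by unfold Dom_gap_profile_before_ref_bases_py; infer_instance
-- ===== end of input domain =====

-- B replaces A's incremental run counter with a base-positions list and index-difference arithmetic (objective: alternative decomposition, same cost).

-- ===== PORT A =====
-- loop body of A: state (gaps_before, r_i, run); list write g[r_i] = run ported as pySetD (exact: r_i ≥ 0 and in range whenever the guarded write fires with ref_len ≥ 0)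
def pvStepA (ref_len : Int) (st : List Int × Int × Int) (ch : Char) : List Int × Int × Int :=
  if ch = '-' then (st.1, st.2.1, st.2.2 + 1)
  else ((if st.2.1 ≤ ref_len then PySem.List.pySetD st.1 st.2.1 st.2.2 else st.1), st.2.1 + 1, 0)

def gap_profile_before_ref_bases_py (aligned_ref : String) (ref_len : Int) : List Int :=
  let st := aligned_ref.toList.foldl (pvStepA ref_len) (List.replicate (ref_len + 1).toNat 0, 0, 0)
  PySem.List.pySetD st.1 ref_len st.2.2

-- ===== PORT B =====
-- loop body of B: state (result, prev, k); list writes ported as pySetD (exact: indices ≥ 0, in range whenever the writes land with ref_len ≥ 0)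
def pvStepB (ref_len : Int) (st : List Int × Int × Int) (pos : Int) : List Int × Int × Int :=
  ((if st.2.2 ≤ ref_len then PySem.List.pySetD st.1 st.2.2 (pos - st.2.1 - 1) else st.1), pos, st.2.2 + 1)

def gap_profile_before_ref_bases_py_alt (aligned_ref : String) (ref_len : Int) : List Int :=
  let cs := aligned_ref.toList
  let base_positions : List Int := (cs.zipIdx.filter (fun p => p.1 ≠ '-')).map (fun p => (p.2 : Int))
  let st := base_positions.foldl (pvStepB ref_len) (List.replicate (ref_len + 1).toNat 0, -1, 0)
  PySem.List.pySetD st.1 ref_len ((cs.length : Int) - st.2.1 - 1)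

-- ===== PRECONDITION & SPEC =====
-- Pre_ excludes ref_len < 0, on which the Python A raises IndexError (gaps_before[ref_len] on an empty list); B raises there too.
def Pre_gap_profile_before_ref_bases_py (aligned_ref : String) (ref_len : Int) : Prop := 0 ≤ ref_len
instance (aligned_ref : String) (ref_len : Int) : Decidable (Pre_gap_profile_before_ref_bases_py aligned_ref ref_len) := by unfold Pre_gap_profile_before_ref_bases_py; infer_instance
def pvWitness_gap_profile_before_ref_bases_py : String × Int := ("A--CG-", 3)

def Spec_gap_profile_before_ref_bases_py (aligned_ref : String) (ref_len : Int) (out : List Int) : Prop := out = gap_profile_before_ref_bases_py_alt aligned_ref ref_len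
instance (aligned_ref : String) (ref_len : Int) (out : List Int) : Decidable (Spec_gap_profile_before_ref_bases_py aligned_ref ref_len out) := by unfold Spec_gap_profile_before_ref_bases_py; infer_instance

-- ===== CLAIM (what is proved, stated in full; the proofs are below) =====
def Claim_equal_gap_profile_before_ref_bases_py : Prop := ∀ (aligned_ref : String) (ref_len : Int), Dom_gap_profile_before_ref_bases_py aligned_ref ref_len → Pre_gap_profile_before_ref_bases_py aligned_ref ref_len → Spec_gap_profile_before_ref_bases_py aligned_ref ref_len (gap_profile_before_ref_bases_py aligned_ref ref_len)

-- ===== LEMMAS AND PROOFS =====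

-- absolute positions of non-'-' characters, offset i
def pvPosList : List Char → Nat → List Int
  | [], _ => []
  | c :: cs, i => if c ≠ '-' then (i : Int) :: pvPosList cs (i + 1) else pvPosList cs (i + 1)

lemma pvPosList_eq (cs : List Char) : ∀ (i : Nat),
    ((cs.zipIdx i).filter (fun p => p.1 ≠ '-')).map (fun p => ((p.2 : Nat) : Int)) = pvPosList cs i := by
  induction cs with
  | nil => intro i; simp [pvPosList]
  | cons c cs ih =>
    intro i
    by_cases hc : c = '-' <;>
      simpa [pvPosList, hc, List.zipIdx_cons] using ih (i + 1)

lemma pvMain (ref_len : Int) (cs : List Char) : ∀ (i : Nat) (g : List Int) (k prev : Int),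
    cs.foldl (pvStepA ref_len) (g, k, (i : Int) - prev - 1) =
      ( ((pvPosList cs i).foldl (pvStepB ref_len) (g, prev, k)).1,
        ((pvPosList cs i).foldl (pvStepB ref_len) (g, prev, k)).2.2,
        ((i : Int) + cs.length) - ((pvPosList cs i).foldl (pvStepB ref_len) (g, prev, k)).2.1 - 1 ) := by
  induction cs with
  | nil => intro i g k prev; simp [pvPosList]
  | cons c cs ih =>
    intro i g k prev
    by_cases hc : c = '-'
    · have h1 : ((i : Int) - prev - 1) + 1 = ((i + 1 : Nat) : Int) - prev - 1 := by push_cast; ring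
      simp only [List.foldl_cons, pvStepA, hc, if_true, pvPosList, ne_eq,
        not_true_eq_false, if_false]
      rw [h1, ih (i + 1) g k prev]
      refine Prod.ext rfl (Prod.ext rfl ?_)
      simp; ring
    · have h0 : (0 : Int) = ((i + 1 : Nat) : Int) - (i : Int) - 1 := by push_cast; ring
      simp only [List.foldl_cons, pvStepA, hc, if_false, pvPosList, ne_eq,
        not_false_eq_true, if_true, pvStepB]
      rw [h0, ih (i + 1) _ (k + 1) (i : Int)]
      refine Prod.ext rfl (Prod.ext rfl ?_)
      simp; ring

-- ===== VERDICT (by name: the statement is the Claim_ definition above) =====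
theorem gap_profile_before_ref_bases_py_spec : Claim_equal_gap_profile_before_ref_bases_py := by
  intro aligned_ref ref_len _ _
  unfold Spec_gap_profile_before_ref_bases_py gap_profile_before_ref_bases_py gap_profile_before_ref_bases_py_alt
  simp only [pvPosList_eq]
  have h := pvMain ref_len aligned_ref.toList 0 (List.replicate (ref_len + 1).toNat 0) 0 (-1)
  norm_num at h
  rw [h]
  norm_num
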